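-- pv_equiv track=rewrite | github.com/MOHAMMAD-KIMIA/Compiler | Compiler 1st phase (Lexical Analysis)/COM.py | dfaSemicolon
-- ===== SOURCE A (Python) =====
-- def dfaSemicolon(input_text):
--     state = 'X'
--     semicolon_tokens = []
--     semicolon_errors = []
--     position = 0
--
--     for ch in input_text:
--         position += 1
--         if ch == ';':
--             semicolon_tokens.append("<;>")
--         else:
--             semicolon_errors.append(position)
--             break
--
--     return semicolon_tokens, semicolon_errors
-- ===== SOURCE B (Python) =====
-- def dfaSemicolon(input_text):
--     n = len(input_text) - len(input_text.lstrip(';'))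
--     semicolon_tokens = ["<;>"] * n
--     semicolon_errors = [n + 1] if n < len(input_text) else []
--     return semicolon_tokens, semicolon_errors
-- ===== Notes on version B (the rewrite author's own statement) =====
-- stated objective: simpler
-- what changed: Replaces the per-character loop with position counter by a closed form: n = len - len(lstrip(';')) leading semicolons, tokens = ['<;>'] * n, error [n+1] iff a non-semicolon follows.
import Mathlib
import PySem

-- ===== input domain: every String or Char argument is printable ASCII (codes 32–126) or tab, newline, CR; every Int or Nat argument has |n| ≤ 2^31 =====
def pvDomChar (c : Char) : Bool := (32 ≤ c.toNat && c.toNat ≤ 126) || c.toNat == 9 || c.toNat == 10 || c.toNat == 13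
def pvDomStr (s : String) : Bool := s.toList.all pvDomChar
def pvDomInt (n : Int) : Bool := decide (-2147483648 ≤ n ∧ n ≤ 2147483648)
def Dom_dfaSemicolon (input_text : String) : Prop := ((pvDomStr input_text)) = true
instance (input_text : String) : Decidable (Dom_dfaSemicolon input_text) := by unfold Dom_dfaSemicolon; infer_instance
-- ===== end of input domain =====

-- B replaces A's per-character loop by a closed form (count of leading semicolons); objective: simpler.

-- ===== PORT A =====
-- A's for-loop with break: position counter and token accumulator, stops at the
-- first non-';' character recording its 1-based position.
def dfaSemicolonLoop : List Char → Int → List String → List String × List Int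
  | [], _, toks => (toks, [])
  | c :: cs, pos, toks =>
    if c = ';' then dfaSemicolonLoop cs (pos + 1) (toks ++ ["<;>"])
    else (toks, [pos + 1])

def dfaSemicolon (input_text : String) : List String × List Int :=
  dfaSemicolonLoop input_text.toList 0 []

-- ===== PORT B =====
def dfaSemicolon_alt (input_text : String) : List String × List Int :=
  let n : Nat := input_text.toList.length - (input_text.toList.dropWhile (· = ';')).length
  (List.replicate n "<;>", if n < input_text.toList.length then [(n : Int) + 1] else [])

-- ===== PRECONDITION & SPEC =====
def Spec_dfaSemicolon (input_text : String) (out : List String × List Int) : Prop := out = dfaSemicolon_alt input_text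
instance (input_text : String) (out : List String × List Int) : Decidable (Spec_dfaSemicolon input_text out) := by unfold Spec_dfaSemicolon; infer_instance

-- ===== CLAIM (what is proved, stated in full; the proofs are below) =====
def Claim_equal_dfaSemicolon : Prop := ∀ (input_text : String), Dom_dfaSemicolon input_text → Spec_dfaSemicolon input_text (dfaSemicolon input_text)

-- ===== LEMMAS AND PROOFS =====
theorem dfaSemicolonLoop_eq (cs : List Char) : ∀ (pos : Int) (toks : List String),
    dfaSemicolonLoop cs pos toks =
      (toks ++ List.replicate ((cs.takeWhile (· = ';')).length) "<;>",
       if (cs.takeWhile (· = ';')).length < cs.length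
       then [pos + (cs.takeWhile (· = ';')).length + 1] else []) := by
  induction cs with
  | nil => intro pos toks; simp [dfaSemicolonLoop]
  | cons c cs ih =>
    intro pos toks
    by_cases h : c = ';'
    · simp [dfaSemicolonLoop, h, ih, List.replicate_succ, List.append_assoc]
      split_ifs with h1
      · congr 1; ring
      · rfl
    · simp [dfaSemicolonLoop, h]

theorem takeWhile_length_eq (cs : List Char) :
    (cs.takeWhile (· = ';')).length = cs.length - (cs.dropWhile (· = ';')).length := by
  have hlen : (cs.takeWhile (· = ';')).length + (cs.dropWhile (· = ';')).length = cs.length := by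
    rw [← List.length_append, List.takeWhile_append_dropWhile]
  omega

-- ===== VERDICT (by name: the statement is the Claim_ definition above) =====
theorem dfaSemicolon_spec : Claim_equal_dfaSemicolon := by
  intro s _
  unfold Spec_dfaSemicolon dfaSemicolon dfaSemicolon_alt
  rw [dfaSemicolonLoop_eq, ← takeWhile_length_eq]
  simp
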